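-- pv_equiv track=rewrite | github.com/LioBuitrago/Bioinformatica | punto 2-1.py | amino_acid_string_Peptide
-- ===== SOURCE A (Python) =====
-- CombinacionesTipoCodon = {
--     'AAA': 'K',
--     'AAC': 'N',
--     'AAG': 'K',
--     'AAU': 'N',
--     'ACA': 'T',
--     'ACC': 'T',
--     'ACG': 'T',
--     'ACU': 'T',
--     'AGA': 'R',
--     'AGC': 'S',
--     'AGG': 'R',
--     'AGU': 'S',
--     'AUA': 'I',
--     'AUC': 'I',
--     'AUG': 'M',
--     'AUU': 'I',
--     'CAA': 'Q',
--     'CAC': 'H',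
--     'CAG': 'Q',
--     'CAU': 'H',
--     'CCA': 'P',
--     'CCC': 'P',
--     'CCG': 'P',
--     'CCU': 'P',
--     'CGA': 'R',
--     'CGC': 'R',
--     'CGG': 'R',
--     'CGU': 'R',
--     'CUA': 'L',
--     'CUC': 'L',
--     'CUG': 'L',
--     'CUU': 'L',
--     'GAA': 'E',
--     'GAC': 'D',
--     'GAG': 'E',
--     'GAU': 'D',
--     'GCA': 'A',
--     'GCC': 'A',
--     'GCG': 'A',
--     'GCU': 'A',
--     'GGA': 'G',
--     'GGC': 'G',
--     'GGG': 'G',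
--     'GGU': 'G',
--     'GUA': 'V',
--     'GUC': 'V',
--     'GUG': 'V',
--     'GUU': 'V',
--     'UAA': 'alto',
--     'UAC': 'Y',
--     'UAG': 'alto',
--     'UAU': 'Y',
--     'UCA': 'S',
--     'UCC': 'S',
--     'UCG': 'S',
--     'UCU': 'S',
--     'UGA': 'alto',
--     'UGC': 'C',
--     'UGG': 'W',
--     'UGU': 'C',
--     'UUA': 'L',
--     'UUC': 'F',
--     'UUG': 'L',
--     'UUU': 'F',
-- }
--
-- def amino_acid_string_Peptide(mrna):
--
--     solucion=''
--     '''
--     The ribosome is made up of proteins + rRNA(ribosomal RNA)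
--     we often view RNA like DNA as primarily enconding information.
--     mRNA it's acting as a transcript for a gene, but it doesn't
--     have to only encode information. It can also provide a functional
--     structural role, which it does in ribosomal RNA. The ribosome
--     it's going to travel along the mRNA from the 5's prime end to the
--     three prime end, reading it, and taking that information, and
--     turning it into a sequence of amino acids.
--     '''
--
--     for i in range(0, len(mrna), 3):
--         triforce=CombinacionesTipoCodon[mrna[i:i+3]]
--         if triforce=='alto':
--             break
--         solucion+=triforce
--
--     return solucion
--     '''
--     61 codons code amino acids
--     3  codons are stop codons
--     '''
-- ===== SOURCE B (Python) =====
-- # B: no codon dictionary at all -- a single character-level pass that encodes each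
-- # base as a digit 0..3, accumulates a base-4 codon value, and every third character
-- # indexes a flat 64-character amino-acid table ('*' marks a stop codon).
--
-- BASES = 'ACGU'
-- TABLE = 'KNKNTTTTRSRSIIMIQHQHPPPPRRRRLLLLEDEDAAAAGGGGVVVV*Y*YSSSS*CWCLFLF'
--
--
-- def amino_acid_string_Peptide(mrna):
--     out = []
--     acc = 0
--     k = 0
--     for ch in mrna:
--         acc = 4 * acc + BASES.index(ch)
--         k += 1
--         if k == 3:
--             aa = TABLE[acc]
--             if aa == '*':
--                 break
--             out.append(aa)
--             acc = 0
--             k = 0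
--     return ''.join(out)
-- ===== Notes on version B (the rewrite author's own statement) =====
-- stated objective: alternative
-- what changed: Replaces the codon dictionary and the 3-strided index loop by a single character-level pass: each base is encoded as a digit 0..3, a base-4 codon value is accumulated, and every third character indexes a flat 64-character amino-acid table ('*' = stop); the collected characters are joined once.
import Mathlib
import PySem

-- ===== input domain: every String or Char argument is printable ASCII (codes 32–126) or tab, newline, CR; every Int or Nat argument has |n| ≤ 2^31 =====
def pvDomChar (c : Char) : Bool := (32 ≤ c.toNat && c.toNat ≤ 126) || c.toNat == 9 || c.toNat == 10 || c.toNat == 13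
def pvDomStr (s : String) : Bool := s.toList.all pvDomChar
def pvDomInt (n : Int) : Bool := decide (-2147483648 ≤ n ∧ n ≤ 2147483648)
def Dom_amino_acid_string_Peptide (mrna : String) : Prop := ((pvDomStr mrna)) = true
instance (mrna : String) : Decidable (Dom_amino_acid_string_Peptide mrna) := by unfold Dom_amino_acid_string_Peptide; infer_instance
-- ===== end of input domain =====

-- B drops A's codon dictionary entirely: one character-level pass encoding each base as a
-- digit 0..3 and indexing a flat 64-char table every third character (alternative; return value only).

-- ===== PORT A =====
-- Module-level constant of A: the codon table (dict → PySem.Dict, insertion order).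
def CombinacionesTipoCodon : PySem.Dict (List Char) String := PySem.Dict.ofList [
  ("AAA".toList, "K"), ("AAC".toList, "N"), ("AAG".toList, "K"), ("AAU".toList, "N"),
  ("ACA".toList, "T"), ("ACC".toList, "T"), ("ACG".toList, "T"), ("ACU".toList, "T"),
  ("AGA".toList, "R"), ("AGC".toList, "S"), ("AGG".toList, "R"), ("AGU".toList, "S"),
  ("AUA".toList, "I"), ("AUC".toList, "I"), ("AUG".toList, "M"), ("AUU".toList, "I"),
  ("CAA".toList, "Q"), ("CAC".toList, "H"), ("CAG".toList, "Q"), ("CAU".toList, "H"),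
  ("CCA".toList, "P"), ("CCC".toList, "P"), ("CCG".toList, "P"), ("CCU".toList, "P"),
  ("CGA".toList, "R"), ("CGC".toList, "R"), ("CGG".toList, "R"), ("CGU".toList, "R"),
  ("CUA".toList, "L"), ("CUC".toList, "L"), ("CUG".toList, "L"), ("CUU".toList, "L"),
  ("GAA".toList, "E"), ("GAC".toList, "D"), ("GAG".toList, "E"), ("GAU".toList, "D"),
  ("GCA".toList, "A"), ("GCC".toList, "A"), ("GCG".toList, "A"), ("GCU".toList, "A"),
  ("GGA".toList, "G"), ("GGC".toList, "G"), ("GGG".toList, "G"), ("GGU".toList, "G"),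
  ("GUA".toList, "V"), ("GUC".toList, "V"), ("GUG".toList, "V"), ("GUU".toList, "V"),
  ("UAA".toList, "alto"), ("UAC".toList, "Y"), ("UAG".toList, "alto"), ("UAU".toList, "Y"),
  ("UCA".toList, "S"), ("UCC".toList, "S"), ("UCG".toList, "S"), ("UCU".toList, "S"),
  ("UGA".toList, "alto"), ("UGC".toList, "C"), ("UGG".toList, "W"), ("UGU".toList, "C"),
  ("UUA".toList, "L"), ("UUC".toList, "F"), ("UUG".toList, "L"), ("UUU".toList, "F")]

-- A's for-loop over range(0, len(mrna), 3) with accumulator 'solucion' and break on 'alto'.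
-- dict[codon] raises KeyError on a missing key; inside Pre_ the key is always present, so '.getD ""' is never taken.
def pvALoop (cs : List Char) (is_ : List Int) (solucion : String) : String :=
  match is_ with
  | [] => solucion
  | i :: rest =>
    let triforce := (PySem.Dict.get? CombinacionesTipoCodon
                      (PySem.List.slice cs (some i) (some (i + 3)))).getD ""
    if triforce == "alto" then solucion
    else pvALoop cs rest (solucion ++ triforce)

-- mrna[i:i+3] is code-point slicing: done on mrna.toList (PySem.Str.slice = PySem.List.slice on toList).
def amino_acid_string_Peptide (mrna : String) : String :=
  pvALoop mrna.toList (PySem.List.pyRange 0 (PySem.Str.len mrna) 3) ""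

-- ===== PORT B =====
-- B's module constants: BASES and the flat 64-char amino-acid table ('*' = stop).
def pvBases : List Char := "ACGU".toList
def pvTable : List Char := "KNKNTTTTRSRSIIMIQHQHPPPPRRRRLLLLEDEDAAAAGGGGVVVV*Y*YSSSS*CWCLFLF".toList

-- Source B's for-loop over the characters with state (acc, k, out); 'out' holds the emitted
-- 1-char strings as Chars. BASES.index(ch) raises ValueError on other chars (none = .getD 0,
-- never taken inside Pre_); TABLE[acc] likewise via pyGet? (in range whenever index succeeded).
def pvBLoop (cs : List Char) (acc : Int) (k : Int) (out : List Char) : List Char :=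
  match cs with
  | [] => out
  | ch :: rest =>
    let acc' := 4 * acc + (((PySem.List.index? pvBases ch).getD 0 : Nat) : Int)
    let k' := k + 1
    if k' == 3 then
      let aa := (PySem.List.pyGet? pvTable acc').getD ' '
      if aa == '*' then out
      else pvBLoop rest 0 0 (out ++ [aa])
    else pvBLoop rest acc' k' out

-- ''.join of 1-char strings = the string of the collected chars.
def amino_acid_string_Peptide_alt (mrna : String) : String :=
  String.ofList (pvBLoop mrna.toList 0 0 [])

-- ===== PRECONDITION & SPEC =====
-- Pre_ excludes exactly the inputs where the Pythons raise (KeyError in A, ValueError/KeyError in B):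
-- some 3-chunk before the first stop codon (including a short final chunk) is not in the codon table.
def Pre_amino_acid_string_Peptide (mrna : String) : Prop :=
  ∀ c ∈ ((PySem.List.pyRange 0 (PySem.Str.len mrna) 3).map
          (fun i => PySem.List.slice mrna.toList (some i) (some (i + 3)))).takeWhile
        (fun c => !(c == "UAA".toList || c == "UAG".toList || c == "UGA".toList)),
    PySem.Dict.contains CombinacionesTipoCodon c = true
instance (mrna : String) : Decidable (Pre_amino_acid_string_Peptide mrna) := by
  unfold Pre_amino_acid_string_Peptide; infer_instance
def pvWitness_amino_acid_string_Peptide : String := "UAA"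

def Spec_amino_acid_string_Peptide (mrna : String) (out : String) : Prop := out = amino_acid_string_Peptide_alt mrna
instance (mrna : String) (out : String) : Decidable (Spec_amino_acid_string_Peptide mrna out) := by unfold Spec_amino_acid_string_Peptide; infer_instance

-- ===== CLAIM (what is proved, stated in full; the proofs are below) =====
def Claim_equal_amino_acid_string_Peptide : Prop := ∀ (mrna : String), Dom_amino_acid_string_Peptide mrna → Pre_amino_acid_string_Peptide mrna → Spec_amino_acid_string_Peptide mrna (amino_acid_string_Peptide mrna)

-- ===== LEMMAS AND PROOFS =====

-- The successive 3-slices, as a structural recursion (last chunk may be short).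
def pyChunks : List Char → List (List Char)
  | [] => []
  | (c :: cs) => (c :: cs).take 3 :: pyChunks (cs.drop 2)
  termination_by cs => cs.length
  decreasing_by simp [List.length_drop]

-- A's per-chunk value (dict lookup) and B's per-chunk value (base-4 index into the table).
def pvDv (p : List Char) : String := (PySem.Dict.get? CombinacionesTipoCodon p).getD ""
def pvBval (p : List Char) : Char :=
  (PySem.List.pyGet? pvTable
    (p.foldl (fun a c => 4 * a + (((PySem.List.index? pvBases c).getD 0 : Nat) : Int)) 0)).getD ' '

-- B's loop, chunk by chunk.
def pvBOf : List (List Char) → List Char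
  | [] => []
  | p :: rest =>
    if p.length = 3 then (if pvBval p = '*' then [] else pvBval p :: pvBOf rest) else []

theorem pvJoinNilNil : PySem.Chars.join [] ([] : List (List Char)) = [] := by
  simp [PySem.Chars.join_nil]

theorem pvJoinNilCons (x : List Char) (xs : List (List Char)) :
    PySem.Chars.join [] (x :: xs) = x ++ PySem.Chars.join [] xs := by
  cases xs with
  | nil => simp [PySem.Chars.join_singleton, PySem.Chars.join_nil]
  | cons y ys => simp [PySem.Chars.join_cons_cons]

-- A's loop, on any index list, appends to the accumulator the joined takeWhile of the dict values.
theorem pvALoop_eq (cs : List Char) (is_ : List Int) (solucion : String) :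
    pvALoop cs is_ solucion =
      solucion ++ PySem.Str.join ""
        ((is_.map (fun i => pvDv (PySem.List.slice cs (some i) (some (i + 3))))).takeWhile
          (fun aa => aa ≠ "alto")) := by
  induction is_ generalizing solucion with
  | nil =>
    have : PySem.Str.join "" ([] : List String) = "" := by
      apply String.toList_inj.mp; simp [PySem.Str.toList_join]
    simp [pvALoop, this]
  | cons i rest ih =>
    have hjc : ∀ (x : String) (xs : List String),
        PySem.Str.join "" (x :: xs) = x ++ PySem.Str.join "" xs := by
      intro x xs
      apply String.toList_inj.mp
      cases xs with
      | nil => simp [PySem.Str.toList_join, PySem.Chars.join, List.intercalate]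
      | cons y ys => simp [PySem.Str.toList_join, PySem.Chars.join_cons_cons]
    by_cases h : pvDv (PySem.List.slice cs (some i) (some (i + 3))) = "alto"
    · have : PySem.Str.join "" ([] : List String) = "" := by
        apply String.toList_inj.mp; simp [PySem.Str.toList_join]
      simp [pvALoop, pvDv] at h ⊢
      simp [h, this]
    · simp only [pvALoop, List.map_cons, List.takeWhile_cons]
      simp only [pvDv] at h
      rw [if_neg (by simpa using h), if_pos (by simp [pvDv, h]), ih, hjc,
        String.append_assoc]
      simp [pvDv]

theorem pvChunksNat (cs : List Char) :
    (List.range ((cs.length + 2) / 3)).map (fun k => (cs.drop (3 * k)).take 3)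
      = pyChunks cs := by
  induction cs using pyChunks.induct with
  | case1 => simp [pyChunks]
  | case2 c cs ih =>
    have hm : ((c :: cs).length + 2) / 3 = ((cs.drop 2).length + 2) / 3 + 1 := by
      simp [List.length_drop]; omega
    rw [hm, List.range_succ_eq_map, List.map_cons, List.map_map]
    simp only [pyChunks]
    congr 1
    rw [← ih]
    apply List.map_congr_left
    intro k _
    simp only [Function.comp_apply]
    have h1 : 3 * (k + 1) = (3 * k) + 3 := by ring
    have h2 : List.drop (3 * k + 3) (c :: cs) = List.drop (3 * k) (cs.drop 2) := by
      rw [List.drop_drop]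
      rw [show 3 * k + 3 = (3 * k + 2) + 1 by ring, List.drop_succ_cons]
      congr 1
      omega
    rw [h1, h2]

-- range(0, len cs, 3) mapped through slicing IS pyChunks.
theorem pvChunks_eq (cs : List Char) :
    (PySem.List.pyRange 0 (cs.length : Int) 3).map
      (fun i => PySem.List.slice cs (some i) (some (i + 3))) = pyChunks cs := by
  rw [PySem.List.pyRange_of_pos 0 (cs.length : Int) (by norm_num), List.map_map]
  have hcount : (if (0:Int) < (cs.length : Int)
      then (((cs.length : Int) - 0 + 3 - 1) / 3).toNat else 0) = (cs.length + 2) / 3 := by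
    split_ifs with h
    · omega
    · have : cs.length = 0 := by omega
      omega
  rw [hcount, ← pvChunksNat cs]
  apply List.map_congr_left
  intro k _
  simp only [Function.comp_apply]
  have h0 : (0 : Int) + 3 * (k : Int) = ((3 * k : Nat) : Int) := by push_cast; ring
  have h3 : ((3 * k : Nat) : Int) + 3 = ((3 * k : Nat) : Int) + ((3 : Nat) : Int) := by norm_num
  rw [h0, h3, PySem.List.slice_natCast_add]

theorem pvBLoop_eq (cs : List Char) (out : List Char) :
    pvBLoop cs 0 0 out = out ++ pvBOf (pyChunks cs) := by
  induction cs using pyChunks.induct generalizing out with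
  | case1 => simp [pvBLoop, pyChunks, pvBOf]
  | case2 c cs ih =>
    match cs with
    | [] => simp [pvBLoop, pyChunks, pvBOf]
    | [b] => simp [pvBLoop, pyChunks, pvBOf]
    | b :: d :: rest =>
      have hch : pyChunks (c :: b :: d :: rest) = [c, b, d] :: pyChunks rest := by
        rw [pyChunks]
        rfl
      have hdrop : List.drop 2 (b :: d :: rest) = rest := rfl
      rw [hdrop] at ih
      simp only [pvBLoop, show ((0:Int)+1 == 3) = false by decide,
        show ((0:Int)+1+1 == 3) = false by decide,
        show ((0:Int)+1+1+1 == 3) = true by decide,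
        Bool.false_eq_true, if_false, if_true]
      by_cases hstop : pvBval [c, b, d] = '*' <;>
        [have hstop2 := hstop; have hstop2 := hstop] <;>
        simp only [pvBval, List.foldl] at hstop2
      · rw [if_pos (by simp only [beq_iff_eq]; exact hstop2), hch]
        simp [pvBOf, hstop]
      · rw [if_neg (by simp only [beq_iff_eq]; exact hstop2), ih, hch]
        simp only [pvBOf, List.length_cons, List.length_nil]
        rw [if_pos (by norm_num), if_neg hstop]
        simp only [pvBval, List.foldl]
        simp [List.append_assoc]

-- Per-key agreement of the two lookups, by computation over the 64 literal keys.
set_option maxRecDepth 8192 in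
theorem pvKeyFacts : ∀ p ∈ (CombinacionesTipoCodon).keys,
    (!(p == "UAA".toList || p == "UAG".toList || p == "UGA".toList)) = true →
      p.length = 3 ∧ pvBval p ≠ '*' ∧ pvDv p ≠ "alto" ∧ (pvDv p).toList = [pvBval p] := by
  decide

-- The main chunk-list lemma: under Pre_, A's joined takeWhile equals B's chunk output.
set_option maxRecDepth 8192 in
theorem pvMain (chunks : List (List Char))
    (h : ∀ p ∈ chunks.takeWhile
        (fun c => !(c == "UAA".toList || c == "UAG".toList || c == "UGA".toList)),
      PySem.Dict.contains CombinacionesTipoCodon p = true) :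
    PySem.Chars.join []
      (((chunks.map pvDv).takeWhile (fun aa => aa ≠ "alto")).map String.toList)
      = pvBOf chunks := by
  induction chunks with
  | nil => simp [pvBOf]
  | cons p rest ih =>
    by_cases hpred : (!(p == "UAA".toList || p == "UAG".toList || p == "UGA".toList)) = true
    · have hpn : ¬p = ['U','A','A'] ∧ ¬p = ['U','A','G'] ∧ ¬p = ['U','G','A'] := by
        simpa [and_assoc] using hpred
      have hTW : List.takeWhile
          (fun c => !(c == "UAA".toList || c == "UAG".toList || c == "UGA".toList)) (p :: rest)
          = p :: List.takeWhile
          (fun c => !(c == "UAA".toList || c == "UAG".toList || c == "UGA".toList)) rest := by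
        simp [hpn.1, hpn.2.1, hpn.2.2]
      rw [hTW] at h
      have hmem : p ∈ (CombinacionesTipoCodon).keys := by
        rw [← PySem.Dict.contains_iff_mem_keys]
        exact h p List.mem_cons_self
      obtain ⟨hlen, hbv, hdv, hdvl⟩ := pvKeyFacts p hmem hpred
      have hrest := fun q hq => h q (List.mem_cons_of_mem _ hq)
      have hTW2 : List.takeWhile (fun aa => decide (aa ≠ "alto")) (pvDv p :: rest.map pvDv)
          = pvDv p :: List.takeWhile (fun aa => decide (aa ≠ "alto")) (rest.map pvDv) := by
        simp [hdv]
      rw [List.map_cons, hTW2, List.map_cons, pvJoinNilCons, ih hrest, hdvl]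
      simp only [pvBOf, hlen]
      rw [if_neg hbv]
      rfl
    · have hp : p = ['U','A','A'] ∨ p = ['U','A','G'] ∨ p = ['U','G','A'] := by
        simp at hpred
        by_cases h1 : p = ['U','A','A']
        · exact Or.inl h1
        by_cases h2 : p = ['U','A','G']
        · exact Or.inr (Or.inl h2)
        exact Or.inr (Or.inr (hpred h1 h2))
      have hdv : pvDv p = "alto" := by
        rcases hp with h1 | h1 | h1 <;> subst h1 <;> decide
      have hbv : pvBval p = '*' ∧ p.length = 3 := by
        rcases hp with h1 | h1 | h1 <;> subst h1 <;> exact ⟨by decide, by decide⟩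
      rw [List.map_cons, List.takeWhile_cons_of_neg (by simp [hdv])]
      simp only [pvBOf, hbv.2, hbv.1]
      exact pvJoinNilNil

-- ===== VERDICT (by name: the statement is the Claim_ definition above) =====
set_option maxRecDepth 8192 in
theorem amino_acid_string_Peptide_spec : Claim_equal_amino_acid_string_Peptide := by
  intro mrna _ hpre
  unfold Spec_amino_acid_string_Peptide amino_acid_string_Peptide amino_acid_string_Peptide_alt
  unfold Pre_amino_acid_string_Peptide at hpre
  rw [pvALoop_eq]
  apply String.toList_inj.mp
  rw [pvBLoop_eq]
  simp only [String.toList_append, String.toList_empty, List.nil_append,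
    PySem.Str.toList_join, String.toList_ofList]
  have hlen : PySem.Str.len mrna = (mrna.toList.length : Int) := by
    simp [PySem.Str.len_eq]
  rw [hlen] at hpre ⊢
  rw [pvChunks_eq] at hpre
  rw [show (PySem.List.pyRange 0 (mrna.toList.length : Int) 3).map
        (fun i => pvDv (PySem.List.slice mrna.toList (some i) (some (i + 3))))
      = ((PySem.List.pyRange 0 (mrna.toList.length : Int) 3).map
          (fun i => PySem.List.slice mrna.toList (some i) (some (i + 3)))).map pvDv by
    rw [List.map_map]
    rfl]
  rw [pvChunks_eq]
  exact pvMain (pyChunks mrna.toList) hpre
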